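-- pv_equiv track=rewrite | github.com/rgamba/shifter | shifter/migrate.py | get_head_migration_on_file
-- ===== SOURCE A (Python) =====
-- def get_head_migration_on_file(migrations):
--     """ Get the highest migration on file. """
--     mig = []
--     for m in migrations:
--         try:
--             m = m.split('_')[0]
--             m = int(m)
--         except Exception:
--             continue
--         mig.append(m)
--     if not mig:
--         return 0
--     return mig.pop()
-- ===== SOURCE B (Python) =====
-- def get_head_migration_on_file(migrations):
--     """ Get the highest migration on file. """
--     for m in reversed(list(migrations)):
--         try:
--             return int(m.split('_')[0])
--         except Exception:
--             continue
--     return 0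
-- ===== Notes on version B (the rewrite author's own statement) =====
-- stated objective: simpler
-- what changed: Replaces the forward scan that accumulates every parsed value in a list and pops the last one with a reverse traversal that returns on the first successfully parsed entry, with no accumulator.
import Mathlib
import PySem

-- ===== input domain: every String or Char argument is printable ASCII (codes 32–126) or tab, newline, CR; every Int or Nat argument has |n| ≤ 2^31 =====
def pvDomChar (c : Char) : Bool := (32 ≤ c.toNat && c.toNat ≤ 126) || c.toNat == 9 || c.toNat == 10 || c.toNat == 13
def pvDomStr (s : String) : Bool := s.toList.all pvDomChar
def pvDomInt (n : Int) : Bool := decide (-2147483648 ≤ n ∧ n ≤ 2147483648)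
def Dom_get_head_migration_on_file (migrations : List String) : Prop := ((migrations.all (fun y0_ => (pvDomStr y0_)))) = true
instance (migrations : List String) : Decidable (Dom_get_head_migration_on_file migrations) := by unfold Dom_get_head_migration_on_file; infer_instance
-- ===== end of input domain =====

-- B: reverse traversal returning the first parseable entry, instead of A's accumulator list popped at the end (return value only; simpler).
-- ===== PORT A =====
-- int(m.split('_')[0]): none exactly where the Python try-block raises
def pvParse (s : String) : Option Int :=
  match PySem.List.pyGet? ((PySem.Str.split? s "_").getD []) 0 with
  | none => none
  | some h => PySem.Int.ofStr? h

def get_head_migration_on_file (migrations : List String) : Int :=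
  let mig := migrations.foldl (fun acc m =>
    match pvParse m with
    | none => acc
    | some v => acc ++ [v]) []
  match mig.getLast? with
  | none => 0
  | some v => v

-- ===== PORT B =====
def pvScanB : List String → Int
  | [] => 0
  | m :: rest =>
    match pvParse m with
    | some v => v
    | none => pvScanB rest

def get_head_migration_on_file_alt (migrations : List String) : Int :=
  pvScanB migrations.reverse

-- ===== PRECONDITION & SPEC =====
def Spec_get_head_migration_on_file (migrations : List String) (out : Int) : Prop := out = get_head_migration_on_file_alt migrations
instance (migrations : List String) (out : Int) : Decidable (Spec_get_head_migration_on_file migrations out) := by unfold Spec_get_head_migration_on_file; infer_instance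

-- ===== CLAIM (what is proved, stated in full; the proofs are below) =====
def Claim_equal_get_head_migration_on_file : Prop := ∀ (migrations : List String), Dom_get_head_migration_on_file migrations → Spec_get_head_migration_on_file migrations (get_head_migration_on_file migrations)

-- ===== LEMMAS AND PROOFS =====

lemma foldlA_eq (l : List String) (acc : List Int) :
    l.foldl (fun acc m => match pvParse m with | none => acc | some v => acc ++ [v]) acc
      = acc ++ l.filterMap pvParse := by
  induction l generalizing acc with
  | nil => simp
  | cons x xs ih =>
    simp only [List.foldl_cons, List.filterMap_cons, ih]
    cases pvParse x <;> simp

lemma scanB_eq (l : List String) :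
    pvScanB l = ((l.filterMap pvParse).head?).getD 0 := by
  induction l with
  | nil => rfl
  | cons x xs ih =>
    simp only [pvScanB, List.filterMap_cons]
    cases pvParse x <;> simp [ih]

-- ===== VERDICT (by name: the statement is the Claim_ definition above) =====
theorem get_head_migration_on_file_spec : Claim_equal_get_head_migration_on_file := by
  intro migrations _
  unfold Spec_get_head_migration_on_file get_head_migration_on_file get_head_migration_on_file_alt
  rw [scanB_eq, List.filterMap_reverse, List.head?_reverse]
  simp only [foldlA_eq, List.nil_append]
  cases h : (migrations.filterMap pvParse).getLast? <;> simp
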